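-- pv_equiv track=rewrite | github.com/smirnovkirilll/table_transfer | src/table_transfer/helpers.py | make_clean_url
-- ===== SOURCE A (Python) =====
-- def make_clean_url(url: str) -> str:
--
--     labels = (
--         '?ssr=true',
--         '?utm',
--         '&utm',
--         '?fbclid',
--         '?source',
--         '?fb_ref',
--         '?fb_action_ids',
--         '?fb_action_types',
--     )
--
--     clean_url = url
--     for label in labels:
--         clean_url = clean_url.split(label)[0]
--
--     return clean_url
-- ===== SOURCE B (Python) =====
-- def make_clean_url(url: str) -> str:
--
--     labels = (
--         '?ssr=true',
--         '?utm',
--         '&utm',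
--         '?fbclid',
--         '?source',
--         '?fb_ref',
--         '?fb_action_ids',
--         '?fb_action_types',
--     )
--
--     for i in range(len(url)):
--         if any(url.startswith(label, i) for label in labels):
--             return url[:i]
--     return url
-- ===== Notes on version B (the rewrite author's own statement) =====
-- stated objective: alternative
-- what changed: Replaces the 8 sequential split-and-keep-first passes (each rebuilding the string) with a single left-to-right scan that truncates the URL at the earliest position where any tracking label starts; equal because no label can straddle another label's cut point.
import Mathlib
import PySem

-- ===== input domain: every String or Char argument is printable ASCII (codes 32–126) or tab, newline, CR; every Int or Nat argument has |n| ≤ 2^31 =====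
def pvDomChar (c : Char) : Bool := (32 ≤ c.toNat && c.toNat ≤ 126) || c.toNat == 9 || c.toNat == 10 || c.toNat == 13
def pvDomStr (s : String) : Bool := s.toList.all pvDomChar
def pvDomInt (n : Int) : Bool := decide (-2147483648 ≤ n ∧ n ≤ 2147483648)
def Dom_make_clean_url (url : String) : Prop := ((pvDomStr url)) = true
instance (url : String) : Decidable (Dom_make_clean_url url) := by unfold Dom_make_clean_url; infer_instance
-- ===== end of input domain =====

-- A = 8 sequential split-and-keep-first passes; B = one scan truncating at the earliest
-- label start. Same return value (proved below); neither mutates anything.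

-- ===== PORT A =====
-- the tuple of labels, as in A
def labelsA : List (List Char) :=
  [ "?ssr=true".toList, "?utm".toList, "&utm".toList, "?fbclid".toList,
    "?source".toList, "?fb_ref".toList, "?fb_action_ids".toList, "?fb_action_types".toList ]

-- clean_url.split(label)[0]: split on a nonempty separator always yields a nonempty
-- list, so [0] is its head (headD [] renders the indexing; never hits the default)
def make_clean_url (url : String) : String :=
  String.mk (labelsA.foldl (fun clean label => (PySem.Chars.splitOn clean label).headD []) url.toList)

-- ===== PORT B =====
-- the loop 'for i in range(len(url)): if any(url.startswith(label, i)…): return url[:i]'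
-- as structural recursion over the character list (position i ↦ current suffix)
def altCut (labels : List (List Char)) : List Char → List Char
  | [] => []
  | c :: rest => if labels.any (fun lab => lab.isPrefixOf (c :: rest)) then [] else c :: altCut labels rest

def make_clean_url_alt (url : String) : String :=
  String.mk (altCut labelsA url.toList)

-- ===== PRECONDITION & SPEC =====
def Spec_make_clean_url (url : String) (out : String) : Prop := out = make_clean_url_alt url
instance (url : String) (out : String) : Decidable (Spec_make_clean_url url out) := by unfold Spec_make_clean_url; infer_instance

-- ===== CLAIM (what is proved, stated in full; the proofs are below) =====
def Claim_equal_make_clean_url : Prop := ∀ (url : String), Dom_make_clean_url url → Spec_make_clean_url url (make_clean_url url)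

-- ===== LEMMAS AND PROOFS =====

-- the result of splitOn.go carries acc.reverse in front
lemma go_acc (sep : List Char) : ∀ (fuel : Nat) (l cur : List Char) (acc : List (List Char)),
    PySem.Chars.splitOn.go sep fuel l cur acc = acc.reverse ++ PySem.Chars.splitOn.go sep fuel l cur [] := by
  intro fuel
  induction fuel with
  | zero => intro l cur acc; simp [PySem.Chars.splitOn.go]
  | succ n ih =>
    intro l cur acc
    cases l with
    | nil => simp [PySem.Chars.splitOn.go]
    | cons c rest =>
      simp only [PySem.Chars.splitOn.go]
      split
      · rw [ih _ _ (cur.reverse :: acc), ih _ _ (cur.reverse :: [])]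
        simp
      · exact ih _ _ _

-- head of the split = truncation at the first occurrence of sep
lemma go_head (sep : List Char) : ∀ (fuel : Nat) (l cur : List Char), l.length ≤ fuel →
    (PySem.Chars.splitOn.go sep fuel l cur []).headD [] = cur.reverse ++ altCut [sep] l := by
  intro fuel
  induction fuel with
  | zero =>
    intro l cur h
    have : l = [] := List.eq_nil_of_length_eq_zero (Nat.le_zero.mp h)
    subst this
    simp [PySem.Chars.splitOn.go, altCut]
  | succ n ih =>
    intro l cur h
    cases l with
    | nil => simp [PySem.Chars.splitOn.go, altCut]
    | cons c rest =>
      simp only [PySem.Chars.splitOn.go]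
      by_cases hp : sep.isPrefixOf (c :: rest) = true
      · rw [if_pos hp, go_acc]
        simp [altCut, hp]
      · rw [if_neg hp, ih rest (c :: cur) (by simpa using Nat.le_of_succ_le_succ (by simpa using h))]
        simp [altCut, hp]

-- A's single pass equals B's single-label cut
lemma splitOn_head (s sep : List Char) :
    (PySem.Chars.splitOn s sep).headD [] = altCut [sep] s := by
  have := go_head sep (s.length + 1) s [] (by omega)
  simpa [PySem.Chars.splitOn] using this

-- altCut keeps a prefix of its input
lemma altCut_prefix (L : List (List Char)) : ∀ s : List Char, altCut L s <+: s := by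
  intro s
  induction s with
  | nil => simp [altCut]
  | cons c rest ih =>
    simp only [altCut]
    split
    · simp
    · exact List.cons_prefix_cons.mpr ⟨rfl, ih⟩

-- if no label of L matches inside the first p.length positions, a prefix p survives the cut
lemma keep_prefix (L : List (List Char)) : ∀ (p s : List Char), p <+: s →
    (∀ l ∈ L, ∀ k, k < p.length → ¬ l <+: s.drop k) → p <+: altCut L s := by
  intro p
  induction p with
  | nil => simp
  | cons a p' ih =>
    intro s hp h
    cases s with
    | nil => simp at hp
    | cons c rest =>
      obtain ⟨hac, hp'⟩ := List.cons_prefix_cons.mp hp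
      subst hac
      simp only [altCut]
      have hany : (L.any (fun lab => lab.isPrefixOf (a :: rest))) = false := by
        by_contra hc
        rw [Bool.not_eq_false, List.any_eq_true] at hc
        obtain ⟨l, hl, hpref⟩ := hc
        exact h l hl 0 (by simp) (by simpa [List.isPrefixOf_iff_prefix] using hpref)
      rw [hany, if_neg (by simp)]
      refine List.cons_prefix_cons.mpr ⟨rfl, ih rest hp' ?_⟩
      intro l hl k hk
      have := h l hl (k + 1) (by simpa using Nat.succ_lt_succ hk)
      simpa using this

-- no label l may match strictly inside lab (either direction of overlap)
def Hyp (l lab : List Char) : Prop :=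
  ∀ k, k < lab.length → 0 < k → ¬ l <+: lab.drop k ∧ ¬ lab.drop k <+: l

-- adding one non-straddling label commutes with cutting on the earlier ones
lemma step_lemma (L : List (List Char)) (lab : List Char) (h : ∀ l ∈ L, Hyp l lab) :
    ∀ s, altCut (L ++ [lab]) s = altCut [lab] (altCut L s) := by
  intro s
  induction s with
  | nil => simp [altCut]
  | cons c rest ih =>
    by_cases hL : (L.any (fun l => l.isPrefixOf (c :: rest))) = true
    · have : ((L ++ [lab]).any (fun l => l.isPrefixOf (c :: rest))) = true := by
        simp [List.any_append]; left; simpa [List.any_eq_true] using hL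
      simp [altCut, hL, this]
    · by_cases hlab : lab.isPrefixOf (c :: rest) = true
      · have hcomb : ((L ++ [lab]).any (fun l => l.isPrefixOf (c :: rest))) = true := by
          simp [List.any_append, hlab]
        have hlab' : lab <+: (c :: rest) := List.isPrefixOf_iff_prefix.mp hlab
        -- B side: lab survives the cut on L, so altCut [lab] cuts at position 0
        have hkeep : lab <+: altCut L (c :: rest) := by
          apply keep_prefix L lab (c :: rest) hlab'
          intro l hl k hk
          intro hcon
          cases k with
          | zero =>
            rw [Bool.not_eq_true, List.any_eq_false] at hL
            exact hL l hl (by simpa [List.isPrefixOf_iff_prefix] using hcon)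
          | succ k' =>
            -- l and lab.drop (k'+1) are both prefixes of (c::rest).drop (k'+1) → comparable
            have hd : lab.drop (k' + 1) <+: (c :: rest).drop (k' + 1) := by
              exact hlab'.drop (k' + 1)
            have hcmp := List.prefix_or_prefix_of_prefix hcon hd
            have hH := h l hl (k' + 1) hk (by omega)
            rcases hcmp with h1 | h2
            · exact hH.1 h1
            · exact hH.2 h2
        cases hAC : altCut L (c :: rest) with
        | nil =>
          rw [hAC] at hkeep
          have : lab = [] := List.prefix_nil.mp hkeep
          simp [altCut, hcomb, hAC, this]
        | cons d t =>
          rw [hAC] at hkeep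
          simp only [altCut, hcomb, if_pos]
          have : lab.isPrefixOf (d :: t) = true := List.isPrefixOf_iff_prefix.mpr hkeep
          simp [altCut, this]
      · have hcomb : ((L ++ [lab]).any (fun l => l.isPrefixOf (c :: rest))) = false := by
          simp only [List.any_append, Bool.or_eq_false_iff]
          exact ⟨by simpa using hL, by simp [hlab]⟩
        simp only [altCut, hcomb, Bool.false_eq_true, if_neg, hL]
        rw [if_neg (by simp [hlab])]
        -- RHS: altCut L (c::rest) = c :: altCut L rest, and lab is not a prefix of it
        have hnot : lab.isPrefixOf (c :: altCut L rest) = false := by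
          rw [Bool.eq_false_iff]
          intro hcon
          have h1 : lab <+: c :: altCut L rest := List.isPrefixOf_iff_prefix.mp hcon
          have h2 : (c :: altCut L rest) <+: (c :: rest) :=
            List.cons_prefix_cons.mpr ⟨rfl, altCut_prefix L rest⟩
          exact (Bool.eq_false_iff.mp (Bool.not_eq_true _ ▸ by simpa using hlab))
            (List.isPrefixOf_iff_prefix.mpr (h1.trans h2))
        rw [if_neg (by simp)]
        simp only [altCut]
        rw [if_neg (by simp [hnot]), ih]

-- the fold of single-label cuts equals the simultaneous cut, for pairwise non-straddling labels
lemma fold_eq (L : List (List Char)) (h : L.Pairwise Hyp) :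
    ∀ s, L.foldl (fun s lab => altCut [lab] s) s = altCut L s := by
  induction L using List.reverseRecOn with
  | nil => intro s; induction s <;> simp [altCut, *] <;> assumption
  | append_singleton L lab ih =>
    intro s
    rw [List.foldl_append]
    simp only [List.foldl_cons, List.foldl_nil]
    rw [ih (List.Pairwise.sublist (by simp) h) s]
    rw [step_lemma L lab ?_ s]
    intro l hl
    have := (List.pairwise_append.mp h).2.2
    exact this l hl lab (by simp)

-- Hyp via a bounded check, so the concrete label list can be verified by decide
lemma hyp_of_check (l lab : List Char)
    (h : ∀ k ∈ List.range lab.length, k ≠ 0 → ¬ l <+: lab.drop k ∧ ¬ lab.drop k <+: l) :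
    Hyp l lab := by
  intro k hk h0
  exact h k (List.mem_range.mpr hk) (by omega)

lemma pairwise_labels : labelsA.Pairwise Hyp := by
  unfold labelsA
  repeat' refine List.Pairwise.cons ?_ ?_
  all_goals
    first
      | exact List.Pairwise.nil
      | (intro lab hlab; fin_cases hlab <;> (apply hyp_of_check; decide))

-- ===== VERDICT (by name: the statement is the Claim_ definition above) =====
theorem make_clean_url_spec : Claim_equal_make_clean_url := by
  intro url _
  unfold Spec_make_clean_url make_clean_url make_clean_url_alt
  congr 1
  have h1 : labelsA.foldl (fun clean label => (PySem.Chars.splitOn clean label).headD []) url.toList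
      = labelsA.foldl (fun s lab => altCut [lab] s) url.toList := by
    simp only [splitOn_head]
  rw [h1, fold_eq labelsA pairwise_labels url.toList]
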